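/- GENERATED by mk_final_copies.py from the proof of the farm's unit `start_decoder.C11f` (farm:start_decoder.C11f.1: Proof.lean) as the
   re-elaboration sweep compiled it — do not edit. -/
import Asan.CheckWalk
import Vorbis.Spec.Reader
import Vorbis.Spec.StartDecoderC4
import Vorbis.Spec.Units.start_decoder_C11f

open X86 X86.User Asan Vorbis Vorbis.Spec Vorbis.Spec.StartDecoder

set_option maxRecDepth 4000
set_option maxHeartbeats 4000000

namespace Vorbis.Spec.start_decoder_C11f

/-- **Segment C11f of `start_decoder`** (`loop11` 0x114ca3, the head of loop 3892): the checked load of `c->lookup_values`;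
`LV ≤ j`: the exit `AtC12` (`C11.carryL` to `pc_C12`, `In11L.toC12`); else the checked load of `c->value_bits` and ONE call of
`get_bits(f, value_bits)` (`C4.reader_pre`), and `In11L` at its return `cut158` (`C11.carryL`) with `eax < 2^16`
(`GetBitsResult`). -/
theorem segC11f_walk {Lay : Layout} (hLay : Lay.hi = 0x1000000) {μ : Microarch} (hμ : UserX.MicroOK μ) {u₀ : State}
    (hcode : HasCodeNat Lay u₀ Vorbis.L.start_decoder.entry Vorbis.Code.code_start_decoder.nat Vorbis.L.start_decoder.size)
    (hgb : ∀ (others : List Obj) (frames : List (Nat × FrameLayout)) (Blk : Block → Prop) (len : Nat), Calls Lay μ Vorbis.WayInv (Vorbis.conv u₀) Vorbis.L.get_bits.entry (Vorbis.Spec.get_bits.spec others frames Blk len))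
    (hld1 : Asan.SmallCheck Lay μ Vorbis.WayInv (Vorbis.CodeOK u₀) [.rax, .rdx] 1 Vorbis.L.__asan_load1_noabort.entry)
    (hld4 : Asan.SmallCheck Lay μ Vorbis.WayInv (Vorbis.CodeOK u₀) [.rax, .rcx, .rdx] 4 Vorbis.L.__asan_load4_noabort.entry)
    {g : Ghost} {i : Nat} {A2 A3 Ai : Arena} {A : Arena × List Obj} {mults n j : Nat} {v : State}
    (hat : In11L u₀ g i A2 A3 Ai A mults n j Vorbis.L.start_decoder.loop11 v) :
    ReachVia Lay μ WayInv v (fun w => AtC12 u₀ g i w ∨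
        (At11L u₀ g i n j Vorbis.L.start_decoder.cut158 w ∧ j < n ∧ (w.reg .rax).toNat < 2 ^ 16)) := by
  have hfr := hat.frame
  have he := hfr.entry
  v_entry he
  simp only [depth] at he_room he_stack
  have w_rip := hfr.rip
  obtain ⟨hr1, hr2⟩ := hfr.r_eq
  simp only [steady] at hr1
  have hRA : g.RA = (g.e.reg .rsp).toNat := rfl
  have c_rsp : v.reg .rsp = g.e.reg .rsp - 1480 := by
    rw [hfr.rsp]
    refine (eq_addr _ _ ?_).symm
    unfold Ghost.R Ghost.RA steady
    u_omega
  -- the struct `c = cb(i)`: inside the codebooks block, a setup block of the arena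
  have ha := hat.cur.sd.arena
  have hcb := hat.cur.ages.cbOK
  have hBA : A.1.Blk (codebooksBlock v.mem g.f) := hcb.F2.mono hat.cur.ages.exti
  have hcin := hcb.cb_in i hat.cur.lt
  have hboff := ha.block_off hBA
  have hbin := arena_inside ha hBA
  have hbnd := ha.bounds
  simp only [vblock, Off.sizeof.Codebook] at hcin hboff hbin
  have hcdef : stb_vorbis.codebooks_at v.mem g.f i = g.cb v.mem i := rfl
  rw [hcdef] at hcin
  have c_r14n : (v.reg .r14).toNat = g.cb v.mem i := by
    rw [hat.cur.r14]
    exact toNat_addr _ (by omega)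
  have hBA' : A.1.Block (stb_vorbis.codebooks v.mem g.f) (2120 * (stb_vorbis.codebook_count v.mem g.f).toNat) := hBA
  have e28 : v.reg .r14 + 28 = addr (g.cb v.mem i + 28) := by
    rw [hat.cur.r14]
    exact Vorbis.addr_add_lit _ 28
  have e24 : v.reg .r14 + 24 = addr (g.cb v.mem i + 24) := by
    rw [hat.cur.r14]
    exact Vorbis.addr_add_lit _ 24
  have t28 : (v.reg .r14 + 28).toNat = g.cb v.mem i + 28 := by
    rw [e28]
    exact toNat_addr _ (by omega)
  have t24 : (v.reg .r14 + 24).toNat = g.cb v.mem i + 24 := by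
    rw [e24]
    exact toNat_addr _ (by omega)
  have hlvlt := hat.mults.lv_lt
  have hjle := hat.j_le
  have hlveq := hat.lv_eq
  have hvb := hat.vb
  have hLV : v.mem.readLE (v.reg .r14 + 28) 4 = Codebook.lookup_values v.mem (g.cb v.mem i) := by
    rw [e28]
    simp only [vacc, voff, Mem.u32]
  have hVB : v.mem.readLE (v.reg .r14 + 24) 1 = Codebook.value_bits v.mem (g.cb v.mem i) := by
    rw [e24]
    simp only [vacc, voff, Mem.u8]
  have hout := hat.cur.hand.objOut
  simp only [voff] at hout
  have hobr := hat.cur.sd.bits.OBR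
  simp only [voff] at hobr
  have t1 : (g.e.reg .rsp - 1488).toNat = (g.e.reg .rsp).toNat - 1488 := by u_omega
  have c_rbp : v.reg .rbp = UInt64.ofNat j := hat.rbp
  have sl_f : v.mem.readLE (g.e.reg .rsp - 1456) 8 = g.f := by
    have e : addr (g.R + 0x18) = g.e.reg .rsp - 1456 := by
      refine (eq_addr _ _ ?_).symm
      unfold Ghost.R Ghost.RA steady
      u_omega
    rw [← e]
    exact hat.cur.slot_f
  have hst := C4.obj_stack hfr hat.cur.hand
  have htx := hat.cur.hand.arenaText
  simp only [Vorbis.L.textHi] at htx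
  have w_eq : Mem.EqOn Vorbis.L.textLo Vorbis.L.textHi u₀.mem v.mem := hfr.code
  have hdf : v.flags .df = false := (show abiInv _ from hfr.inv).1
  have hmx : v.mxcsr &&& 0x1F80 = 0x1F80 := (show abiInv _ from hfr.inv).2
  have hsse := Vorbis.sseOK_of_abiInv hfr.inv
  have hgb' := hgb A.2 g.frames' (g.Blk A) g.len
  u_walk hcode [hμ.vendor] until [Vorbis.L.start_decoder.cut165, Vorbis.L.start_decoder.cut158] span [Vorbis.L.textLo, Vorbis.L.textHi] side (v_side)
  case check_114ca7 =>
    have hun : ShadowUntouched v.mem s_114ca7.mem := by v_untouched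
    have hsh' := hfr.shadow.untouched hun
    refine ⟨hsh'.sealed, ?_⟩
    rw [t28]
    exact ha.block_acc_inv hsh' hBA' (by omega) (by omega) (by decide)
  case check_114cbc =>
    have hun : ShadowUntouched v.mem s_114cbc.mem := by v_untouched
    have hsh' := hfr.shadow.untouched hun
    refine ⟨hsh'.sealed, ?_⟩
    rw [t24]
    exact ha.block_acc_inv hsh' hBA' (by omega) (by omega) (by decide)
  case call_inv => v_inv
  case pre_114ccb =>
    have hun : ShadowUntouched v.mem s_114ccb.mem := by v_untouched
    refine ⟨C4.reader_pre hfr hat.cur hun ?_ ?_ ?_, ?_⟩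
    · rw [w_rsp, t1]
      omega
    · rw [w_rdi]
      rfl
    · rw [w_mem]
      exact Mem.eqOn_writeLE v.mem _ 8 _ g.f 1808 (by rw [t1]; omega) (by rw [t1]; omega)
    · rw [bitsArg_def, w_rsi]
      have h16 := hvb.2
      generalize Codebook.value_bits v.mem (g.cb v.mem i) = b at h16
      have key : ∀ x : Fin 17, (Word.ofBV (BitVec.zeroExtend 32 (BitVec.ofNat 8 x.val))).toNat % 2 ^ 32 ≤ 32 := by
        decide
      exact key ⟨b, by omega⟩
  · -- `LV ≤ j` (signed, both below 2^30): the loop is over, `AtC12`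
    have hj30 : j < 2 ^ 31 := by omega
    rw [cnt32_toInt _ (by omega), cnt32_part_toInt j hj30] at hbr_114cb2
    have hsame : Mem.SameExcept [⟨g.R - 408, g.R⟩] v.mem s_114cb2.mem := by
      rw [w_mem]
      refine Mem.SameExcept.writeLE _ v.mem _ 8 _ ?_ ⟨⟨g.R - 408, g.R⟩, List.mem_cons_self, ?_, ?_⟩
      · rw [t1]
        omega
      · rw [t1]
        show g.R - 408 ≤ _
        omega
      · rw [t1]
        show _ ≤ g.R
        omega
    have hq : ∀ x, x ∈ [(⟨g.R - 408, g.R⟩ : Span)] → C11.QuietWinL g x := by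
      intro x hx
      rw [List.mem_singleton.mp hx]
      unfold C11.QuietWinL
      left
      exact ⟨Nat.le_refl _, Nat.le_refl _⟩
    have hun : ShadowUntouched v.mem s_114cb2.mem := by v_untouched
    have heq : Mem.EqOn g.f (g.f + 1808) v.mem s_114cb2.mem := by
      apply hsame.eqOn
      intro w hw
      simp only [List.mem_cons, List.not_mem_nil, or_false] at hw
      rw [hw]
      show g.f + 1808 ≤ g.R - 408 ∨ g.R ≤ g.f
      exact hst
    have habi : abiInv s_114cb2 := by
      refine Vorbis.abiInv_of ?_ ?_
      · rw [w_flags]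
        simp only [X86.User.df_setStatus]
        exact w_df_114ca7
      · rw [w_mxcsr]
        exact hmx
    have hrsp : s_114cb2.reg .rsp = v.reg .rsp := by
      rw [w_rsp, c_rsp]
    have hL := C11.carryL (pc' := pc_C12) (j' := j) hat hsame hun hq (C4.bits_same hat.cur heq) w_rip hrsp w_eq habi
      (w_kept .r14 rfl) ((w_kept .rbp rfl).trans hat.rbp) hjle
    have hrbx : s_114cb2.reg .rbx = addr (Codebook.lookup_values s_114cb2.mem (g.cb s_114cb2.mem i)) := by
      rw [w_rbx, hL.lv_eq, ← hlveq]
      exact cnt32_ofBV _ (by omega)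
    exact ReachVia.done (Or.inl (hL.toC12 hrbx))
  · -- the return of `get_bits(f, value_bits)`: `In11L` at `cut158`, `j < n`
    v_after_call w_rsp_114ccb w_mem_114ccb
    have hj30 : j < 2 ^ 31 := by omega
    rw [cnt32_toInt _ (by omega), cnt32_part_toInt j hj30] at hbr_114cb2
    have hf : (s_114ccb.reg .rdi).toNat = g.f := by
      rw [w_rdi_114ccb]
      exact toNat_addr g.f (by omega)
    simp only [hf, t1] at w_same
    have hjn : j < n := by omega
    have hpush : Mem.SameExcept [⟨g.R - 408, g.R⟩] v.mem (v.mem.writeLE (g.e.reg .rsp - 1488) 8 1133776) := by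
      refine Mem.SameExcept.writeLE _ v.mem _ 8 _ ?_ ⟨⟨g.R - 408, g.R⟩, List.mem_cons_self, ?_, ?_⟩
      · rw [t1]
        omega
      · rw [t1]
        show g.R - 408 ≤ _
        omega
      · rw [t1]
        show _ ≤ g.R
        omega
    -- the push and the reader's footprint as one footprint over the cut point's memory
    have hall : Mem.SameExcept [⟨g.R - 408, g.R⟩, ⟨g.f + 48, g.f + 56⟩, ⟨g.f + 84, g.f + 96⟩, ⟨g.f + 136, g.f + 144⟩,
        ⟨g.f + 1484, g.f + 1749⟩, ⟨g.f + 1752, g.f + 1784⟩] v.mem s_114ccbr.mem := by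
      refine Mem.SameExcept.trans (ν := v.mem.writeLE (g.e.reg .rsp - 1488) 8 1133776) ?_ ?_
      · apply hpush.mono
        intro w hw a h1 h2
        rw [List.mem_singleton.mp hw] at h1 h2
        exact ⟨_, List.mem_cons_self, h1, h2⟩
      · apply w_same.mono
        intro w hw a h1 h2
        simp only [List.mem_cons, List.mem_nil_iff, or_false] at hw
        rcases hw with rfl | rfl | rfl | rfl | rfl | rfl
        · simp only [] at h1 h2
          exact ⟨_, List.mem_cons_self, by simp only []; omega, by simp only []; omega⟩
        · exact ⟨_, List.mem_cons_of_mem _ List.mem_cons_self, h1, h2⟩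
        · exact ⟨_, List.mem_cons_of_mem _ (List.mem_cons_of_mem _ List.mem_cons_self), h1, h2⟩
        · exact ⟨_, List.mem_cons_of_mem _ (List.mem_cons_of_mem _ (List.mem_cons_of_mem _ List.mem_cons_self)), h1, h2⟩
        · exact ⟨_, List.mem_cons_of_mem _ (List.mem_cons_of_mem _ (List.mem_cons_of_mem _ (List.mem_cons_of_mem _
            List.mem_cons_self))), h1, h2⟩
        · exact ⟨_, List.mem_cons_of_mem _ (List.mem_cons_of_mem _ (List.mem_cons_of_mem _ (List.mem_cons_of_mem _
            (List.mem_cons_of_mem _ List.mem_cons_self)))), h1, h2⟩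
    have hq : ∀ x, x ∈ [(⟨g.R - 408, g.R⟩ : Span), ⟨g.f + 48, g.f + 56⟩, ⟨g.f + 84, g.f + 96⟩, ⟨g.f + 136, g.f + 144⟩,
        ⟨g.f + 1484, g.f + 1749⟩, ⟨g.f + 1752, g.f + 1784⟩] → C11.QuietWinL g x := by
      intro x hx
      simp only [List.mem_cons, List.mem_nil_iff, or_false] at hx
      unfold C11.QuietWinL
      rcases hx with rfl | rfl | rfl | rfl | rfl | rfl
      · left
        exact ⟨Nat.le_refl _, Nat.le_refl _⟩
      · right; left
        exact ⟨Nat.le_refl _, Nat.le_refl _⟩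
      · right; right; left
        exact ⟨Nat.le_refl _, Nat.le_refl _⟩
      · right; right; right; left
        exact ⟨Nat.le_refl _, Nat.le_refl _⟩
      · right; right; right; right; left
        exact ⟨Nat.le_refl _, Nat.le_refl _⟩
      · right; right; right; right; right
        exact ⟨Nat.le_refl _, Nat.le_refl _⟩
    have hp : GetBitsSpecPost (g.Blk A) g.len (s_114ccb.reg .rdi).toNat (bitsArg s_114ccb) s_114ccb s_114ccbr := w_post
    have hbits := hp.bits.bits
    rw [hf] at hbits
    have hun0 : ShadowUntouched v.mem s_114ccb.mem := by v_untouched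
    have hunAll : ShadowUntouched v.mem s_114ccbr.mem := Mem.EqOn.trans hun0 hp.untouched
    have habi : abiInv s_114ccbr := Vorbis.abiInv_of w_df w_mx
    have hrsp : s_114ccbr.reg .rsp = v.reg .rsp := by
      rw [w_rsp, c_rsp]
    have hL := C11.carryL (pc' := Vorbis.L.start_decoder.cut158) (j' := j) hat hall hunAll hq hbits w_rip hrsp
      (Vorbis.conv_code_eqOn w_code) habi (w_kept .r14 rfl) ((w_kept .rbp rfl).trans hat.rbp) hjle
    -- the result of `get_bits(f, value_bits)` with `value_bits ≤ 16`
    have hrax : (s_114ccbr.reg .rax).toNat < 2 ^ 16 := by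
      have hres := hp.bits.result
      have h16 := hvb.2
      have harg : bitsArg s_114ccb = Codebook.value_bits v.mem (g.cb v.mem i) := by
        rw [bitsArg_def, w_rsi_114ccb]
        generalize Codebook.value_bits v.mem (g.cb v.mem i) = b at h16
        have key : ∀ x : Fin 17, (Word.ofBV (BitVec.zeroExtend 32 (BitVec.ofNat 8 x.val))).toNat % 2 ^ 32 = x.val := by
          decide
        exact key ⟨b, by omega⟩
      rw [harg] at hres
      have hlt := hres.2 (by omega)
      have hpow : 2 ^ Codebook.value_bits v.mem (g.cb v.mem i) ≤ 2 ^ 16 := Nat.pow_le_pow_right (by decide) h16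
      omega
    exact ReachVia.done (Or.inr ⟨⟨A, mults, A2, A3, Ai, hL⟩, hjn, hrax⟩)


end Vorbis.Spec.start_decoder_C11f

/-- The unit `start_decoder.C11f`: `segC11f_walk` at every entry state. -/
theorem Vorbis.Spec.Worked.start_decoder_C11f_ok : Vorbis.Spec.start_decoder_C11f.Statement := by
  intro Lay hLay μ hμ u₀ hcode hgb hld1 hld4 g i n j v hat
  obtain ⟨A, mults, A2, A3, Ai, h⟩ := hat
  exact Vorbis.Spec.start_decoder_C11f.segC11f_walk hLay hμ hcode hgb hld1 hld4 h
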